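-- pv_equiv track=rewrite | github.com/zhiqinlei/ProblemSolved | ExtraProblems/Amazon/Number-of-Connections.py | numberOfConnections
-- ===== SOURCE A (Python) =====
-- def numberOfConnections(gridOfNodes):
--     # time complexity O(n^2)
--     connections = 0
--     if len(gridOfNodes) <= 1:
--         return connections
--     prev_nodes_sum = sum([x for x in gridOfNodes[0] if x == 1])
--     for row in gridOfNodes[1:]:
--         curr_nodes_sum = sum([x for x in row if x == 1])
--         if curr_nodes_sum > 0:
--             connections += prev_nodes_sum * curr_nodes_sum
--             prev_nodes_sum = curr_nodes_sum
--     return connections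
-- ===== SOURCE B (Python) =====
-- def numberOfConnections(gridOfNodes):
--     # For each row with nodes, find the nearest earlier row with nodes by a
--     # backward index scan and add the product of their node sums.
--     sums = [sum(x for x in row if x == 1) for row in gridOfNodes]
--     total = 0
--     for j in range(len(sums)):
--         if sums[j] > 0:
--             for i in range(j - 1, -1, -1):
--                 if sums[i] > 0:
--                     total += sums[i] * sums[j]
--                     break
--     return total
-- ===== Notes on version B (the rewrite author's own statement) =====
-- stated objective: alternative
-- what changed: Instead of A's single streaming pass that maintains a running previous-sum, B indexes the per-row sums and, for each row with nodes, scans backwards to find the nearest earlier row with nodes, summing products of such pairs.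
import Mathlib
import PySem

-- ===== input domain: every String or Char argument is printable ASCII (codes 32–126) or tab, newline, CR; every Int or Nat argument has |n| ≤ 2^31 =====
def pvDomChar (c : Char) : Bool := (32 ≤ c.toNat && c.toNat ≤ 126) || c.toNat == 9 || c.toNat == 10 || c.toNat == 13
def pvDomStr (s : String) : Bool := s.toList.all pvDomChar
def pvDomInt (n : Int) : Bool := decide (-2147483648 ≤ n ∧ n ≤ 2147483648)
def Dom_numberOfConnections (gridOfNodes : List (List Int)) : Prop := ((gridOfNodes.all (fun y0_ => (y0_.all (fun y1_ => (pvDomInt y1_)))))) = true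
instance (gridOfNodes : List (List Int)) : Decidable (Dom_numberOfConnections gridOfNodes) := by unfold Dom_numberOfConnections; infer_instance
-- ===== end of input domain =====

-- B replaces A's streaming pass (running previous-sum) by an indexed pairing: for each row with nodes, a backward scan finds the nearest earlier row with nodes (alternative decomposition, same result).


-- ===== PORT A =====
-- sum([x for x in row if x == 1])  (the row-sum expression appears verbatim in both Pythons)
def pvRowSum (row : List Int) : Int := (row.filter (fun x => x == 1)).sum

def numberOfConnections (gridOfNodes : List (List Int)) : Int :=
  -- connections = 0; early return when len <= 1
  if gridOfNodes.length ≤ 1 then 0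
  else
    let prev0 := pvRowSum (gridOfNodes.headD [])   -- gridOfNodes[0]; in range by the guard
    -- state: (connections, prev_nodes_sum)
    (((gridOfNodes.drop 1).foldl
        (fun st row =>
          let curr := pvRowSum row
          if 0 < curr then (st.1 + st.2 * curr, curr) else st)
        ((0 : Int), prev0))).1

-- ===== PORT B =====
-- inner loop 'for i in range(j-1,-1,-1): if sums[i] > 0: total += sums[i]*sums[j]; break':
-- pvScan sums sj k scans indices k-1, k-2, …, 0 for the first positive sum (0 if none)
def pvScan (sums : List Int) (sj : Int) : Nat → Int
  | 0 => 0
  | k + 1 => if 0 < sums.getD k 0 then sums.getD k 0 * sj else pvScan sums sj k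

def numberOfConnections_alt (gridOfNodes : List (List Int)) : Int :=
  let sums := gridOfNodes.map pvRowSum
  (List.range sums.length).foldl
    (fun total j =>
      if 0 < sums.getD j 0 then total + pvScan sums (sums.getD j 0) j else total)
    0

-- ===== PRECONDITION & SPEC =====
def Spec_numberOfConnections (gridOfNodes : List (List Int)) (out : Int) : Prop := out = numberOfConnections_alt gridOfNodes
instance (gridOfNodes : List (List Int)) (out : Int) : Decidable (Spec_numberOfConnections gridOfNodes out) := by unfold Spec_numberOfConnections; infer_instance

-- ===== CLAIM (what is proved, stated in full; the proofs are below) =====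
def Claim_equal_numberOfConnections : Prop := ∀ (gridOfNodes : List (List Int)), Dom_numberOfConnections gridOfNodes → Spec_numberOfConnections gridOfNodes (numberOfConnections gridOfNodes)

-- ===== LEMMAS AND PROOFS =====

-- sum of adjacent products: the common characterisation of both programs
def pvAdj : List Int → Int
  | a :: b :: t => a * b + pvAdj (b :: t)
  | _ => 0

theorem pvRowSum_nonneg (row : List Int) : 0 ≤ pvRowSum row := by
  apply List.sum_nonneg
  intro x hx
  have := List.of_mem_filter hx
  simp at this
  omega

theorem pvAdj_zero_cons (l : List Int) : pvAdj (0 :: l) = pvAdj l := by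
  cases l with
  | nil => rfl
  | cons b t => simp [pvAdj]

theorem pvAdj_append_singleton (L : List Int) (a : Int) :
    pvAdj (L ++ [a]) = pvAdj L + L.getLastD 0 * a := by
  induction L with
  | nil => simp [pvAdj]
  | cons b t ih =>
    cases t with
    | nil => simp [pvAdj]
    | cons c t' =>
      simp only [List.cons_append, pvAdj] at *
      rw [ih]
      simp
      ring

-- A's fold result in terms of pvAdj of the positive row sums
theorem foldA_eq (rows : List (List Int)) (acc p : Int) :
    ((rows.foldl
        (fun st row =>
          let curr := pvRowSum row
          if 0 < curr then (st.1 + st.2 * curr, curr) else st)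
        (acc, p))).1
      = acc + pvAdj (p :: ((rows.map pvRowSum).filter (fun s => 0 < s))) := by
  induction rows generalizing acc p with
  | nil => simp [pvAdj]
  | cons r rs ih =>
    simp only [List.foldl_cons, List.map_cons, List.filter_cons]
    by_cases h : 0 < pvRowSum r
    · simp only [h, if_pos, decide_true]
      rw [ih]
      simp [pvAdj]
      ring
    · simp only [h, decide_false]
      rw [ih]
      simp

-- A = pvAdj of the positive row sums
theorem A_char (g : List (List Int)) :
    numberOfConnections g = pvAdj ((g.map pvRowSum).filter (fun s => 0 < s)) := by
  unfold numberOfConnections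
  cases g with
  | nil => simp [pvAdj]
  | cons r rs =>
    cases rs with
    | nil =>
      simp only [List.length_cons, List.length_nil]
      rw [if_pos (by omega)]
      simp only [List.map_cons, List.map_nil, List.filter_cons, List.filter_nil]
      by_cases h : 0 < pvRowSum r <;> simp [h, pvAdj]
    | cons r1 rs' =>
      rw [if_neg (by simp)]
      simp only [List.headD_cons, List.drop_succ_cons, List.drop_zero]
      rw [foldA_eq]
      simp only [List.map_cons, List.filter_cons, zero_add]
      by_cases h : 0 < pvRowSum r
      · simp [h]
      · have h0 : pvRowSum r = 0 := le_antisymm (by omega) (pvRowSum_nonneg r)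
        simp [h0, pvAdj_zero_cons]

theorem getD_append_left (T : List Int) (a : Int) (j : Nat) (h : j < T.length) :
    (T ++ [a]).getD j 0 = T.getD j 0 := by
  simp [List.getD_eq_getElem?_getD, List.getElem?_append_left h]

theorem pvScan_append (T : List Int) (a sj : Int) (k : Nat) (hk : k ≤ T.length) :
    pvScan (T ++ [a]) sj k = pvScan T sj k := by
  induction k with
  | zero => rfl
  | succ k ih =>
    simp only [pvScan, getD_append_left T a k (by omega)]
    rw [ih (by omega)]

theorem pvScan_full (T : List Int) (sj : Int) :
    pvScan T sj T.length = (T.filter (fun s => 0 < s)).getLastD 0 * sj := by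
  induction T using List.reverseRecOn with
  | nil => simp [pvScan]
  | append_singleton T a ih =>
    have hlen : (T ++ [a]).length = T.length + 1 := by simp
    rw [hlen]
    have hget : (T ++ [a]).getD T.length 0 = a := by
      simp [List.getD_eq_getElem?_getD]
    simp only [pvScan, hget]
    by_cases h : 0 < a
    · simp [h, List.filter_append]
    · rw [if_neg h, pvScan_append T a sj T.length le_rfl, ih]
      simp [List.filter_append, h]

-- B's indexed double loop also computes pvAdj of the positive entries
theorem Bfold_eq (S : List Int) :
    (List.range S.length).foldl
      (fun total j => if 0 < S.getD j 0 then total + pvScan S (S.getD j 0) j else total) 0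
    = pvAdj (S.filter (fun s => 0 < s)) := by
  induction S using List.reverseRecOn with
  | nil => simp [pvAdj]
  | append_singleton T a ih =>
    have hlen : (T ++ [a]).length = T.length + 1 := by simp
    rw [hlen, List.range_succ, List.foldl_append]
    have hcongr :
        (List.range T.length).foldl
          (fun total j => if 0 < (T ++ [a]).getD j 0 then total + pvScan (T ++ [a]) ((T ++ [a]).getD j 0) j else total) 0
        = (List.range T.length).foldl
          (fun total j => if 0 < T.getD j 0 then total + pvScan T (T.getD j 0) j else total) 0 := by
      apply PySem.List.foldl_congr_mem
      intro acc j hj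
      have hjlt : j < T.length := by
        have := List.mem_range.mp hj
        omega
      rw [getD_append_left T a j hjlt, pvScan_append T a _ j (by omega)]
    rw [hcongr, ih]
    have hget : (T ++ [a]).getD T.length 0 = a := by
      simp [List.getD_eq_getElem?_getD]
    simp only [List.foldl_cons, List.foldl_nil, hget]
    by_cases h : 0 < a
    · rw [if_pos h, pvScan_append T a a T.length le_rfl, pvScan_full]
      simp [List.filter_append, h, pvAdj_append_singleton]
    · rw [if_neg h]
      simp [List.filter_append, h]

-- ===== VERDICT (by name: the statement is the Claim_ definition above) =====
theorem numberOfConnections_spec : Claim_equal_numberOfConnections := by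
  intro g _
  unfold Spec_numberOfConnections
  rw [A_char]
  exact (Bfold_eq (g.map pvRowSum)).symm
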